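-- pv_equiv track=rewrite | github.com/okabe15/Aplikasi-TA | Backend/app/services/comfyui_service.py | _extract_key_features
-- ===== SOURCE A (Python) =====
-- def _extract_key_features(description: str) -> str:
--     """Extract key visual features from character description for emphasis"""
--     features = []
--
--     # Look for key descriptive words
--     keywords = ['hair', 'eyes', 'tall', 'short', 'beard', 'glasses', 'hat', 'dress', 'suit', 'jacket']
--     desc_lower = description.lower()
--
--     for keyword in keywords:
--         if keyword in desc_lower:
--             # Find the phrase containing this keyword
--             words = description.split()
--             for i, word in enumerate(words):
--                 if keyword in word.lower():
--                     # Get surrounding context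
--                     start = max(0, i-2)
--                     end = min(len(words), i+3)
--                     phrase = ' '.join(words[start:end])
--                     features.append(phrase)
--                     break
--
--     return ', '.join(features[:3]) if features else description[:100]
-- ===== SOURCE B (Python) =====
-- def _extract_key_features(description: str) -> str:
--     """Extract key visual features from character description for emphasis"""
--     keywords = ['hair', 'eyes', 'tall', 'short', 'beard', 'glasses', 'hat', 'dress', 'suit', 'jacket']
--     words = description.split()
--
--     # One pass over the words: record the first word-index containing each keyword
--     first = {}
--     for i, word in enumerate(words):
--         wl = word.lower()
--         for kw in keywords:
--             if kw not in first and kw in wl: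
--                 first[kw] = i
--
--     # Emit phrases in keyword order
--     features = []
--     for kw in keywords:
--         if kw in first:
--             i = first[kw]
--             features.append(' '.join(words[max(0, i - 2):min(len(words), i + 3)]))
--
--     return ', '.join(features[:3]) if features else description[:100]
-- ===== Notes on version B (the rewrite author's own statement) =====
-- stated objective: alternative
-- what changed: A rescans the whole word list once per keyword (guarded by a redundant substring test on the whole lowered description); B makes one indexing pass over the words recording each keyword's first word-index in a dict, then emits the phrases in a single pass over the keyword list.
import Mathlib
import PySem

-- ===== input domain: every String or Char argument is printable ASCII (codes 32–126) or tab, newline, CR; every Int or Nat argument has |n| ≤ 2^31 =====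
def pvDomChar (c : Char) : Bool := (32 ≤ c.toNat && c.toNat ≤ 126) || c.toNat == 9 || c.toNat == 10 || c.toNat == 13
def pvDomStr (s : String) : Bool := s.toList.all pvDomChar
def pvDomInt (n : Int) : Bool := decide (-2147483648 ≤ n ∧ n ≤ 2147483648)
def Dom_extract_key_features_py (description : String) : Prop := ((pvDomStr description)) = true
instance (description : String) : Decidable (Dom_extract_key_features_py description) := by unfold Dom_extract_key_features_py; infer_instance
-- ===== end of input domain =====

-- B replaces A's per-keyword rescan of the word list (guarded by a whole-string substring
-- test) with ONE indexing pass over the words that records each keyword's first word-index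
-- in a dict, followed by an emit pass in keyword order (objective: alternative).

-- the literal keyword list both Pythons carry
def pvKeywords : List String :=
  ["hair", "eyes", "tall", "short", "beard", "glasses", "hat", "dress", "suit", "jacket"]

-- ===== PORT A =====
-- A's inner 'for i, word in enumerate(words): … break' loop: first word containing kw, its phrase
def pvAScan (kw : String) (allWords : List String) (i : Int) : List String → Option String
  | [] => none
  | w :: ws =>
    if PySem.Str.isIn kw (PySem.Str.lower w) then
      some (PySem.Str.join " " (PySem.List.slice allWords
              (some (max 0 (i - 2))) (some (min (PySem.List.len allWords) (i + 3)))))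
    else pvAScan kw allWords (i + 1) ws

def extract_key_features_py (description : String) : String :=
  let desc_lower := PySem.Str.lower description
  let features := pvKeywords.foldl (fun acc kw =>
    if PySem.Str.isIn kw desc_lower then
      let words := PySem.Str.split₀ description
      match pvAScan kw words 0 words with
      | some phrase => acc ++ [phrase]
      | none => acc
    else acc) []
  if features.isEmpty then PySem.Str.slice description none (some 100)
  else PySem.Str.join ", " (PySem.List.slice features none (some 3))

-- ===== PORT B =====
-- B's single indexing pass: dict from keyword to first word-index containing it
def pvBIndex (words : List String) : PySem.Dict String Int :=
  (PySem.List.enumerate words).foldl (fun d p =>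
    let wl := PySem.Str.lower p.2
    pvKeywords.foldl (fun d kw =>
      if !d.contains kw && PySem.Str.isIn kw wl then d.insert kw p.1 else d) d)
    PySem.Dict.empty

def extract_key_features_py_alt (description : String) : String :=
  let words := PySem.Str.split₀ description
  let first := pvBIndex words
  let features := pvKeywords.foldl (fun acc kw =>
    match first.get? kw with
    | some i => acc ++ [PySem.Str.join " " (PySem.List.slice words
                  (some (max 0 (i - 2))) (some (min (PySem.List.len words) (i + 3))))]
    | none => acc) []
  if features.isEmpty then PySem.Str.slice description none (some 100)
  else PySem.Str.join ", " (PySem.List.slice features none (some 3))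

-- ===== PRECONDITION & SPEC =====
def Spec_extract_key_features_py (description : String) (out : String) : Prop := out = extract_key_features_py_alt description
instance (description : String) (out : String) : Decidable (Spec_extract_key_features_py description out) := by unfold Spec_extract_key_features_py; infer_instance

-- ===== CLAIM (what is proved, stated in full; the proofs are below) =====
def Claim_equal_extract_key_features_py : Prop := ∀ (description : String), Dom_extract_key_features_py description → Spec_extract_key_features_py description (extract_key_features_py description)

-- ===== LEMMAS AND PROOFS =====

-- spec skeleton: first index (from i) of a word containing kw
def pvFirstIdx (kw : String) (i : Int) : List String → Option Int
  | [] => none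
  | w :: ws => if PySem.Str.isIn kw (PySem.Str.lower w) then some i else pvFirstIdx kw (i + 1) ws

-- the phrase built around word-index j
def pvPhrase (allWords : List String) (j : Int) : String :=
  PySem.Str.join " " (PySem.List.slice allWords
    (some (max 0 (j - 2))) (some (min (PySem.List.len allWords) (j + 3))))

theorem pvAScan_eq (kw : String) (allWords : List String) (i : Int) (rest : List String) :
    pvAScan kw allWords i rest = (pvFirstIdx kw i rest).map (pvPhrase allWords) := by
  induction rest generalizing i with
  | nil => simp [pvAScan, pvFirstIdx]
  | cons w ws ih =>
    simp only [pvAScan, pvFirstIdx]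
    split_ifs <;> simp [ih, pvPhrase, PySem.List.len_eq]

theorem pvInnerFold_get? (ks : List String) (wl : String) (i : Int)
    (d : PySem.Dict String Int) (kw : String) :
    (ks.foldl (fun d k =>
        if !d.contains k && PySem.Str.isIn k wl then d.insert k i else d) d).get? kw
      = if kw ∈ ks ∧ d.get? kw = none ∧ PySem.Str.isIn kw wl = true then some i
        else d.get? kw := by
  induction ks generalizing d with
  | nil => simp
  | cons k ks ih =>
    rw [List.foldl_cons, ih]
    by_cases hk : kw = k
    · subst hk
      rcases h : d.get? kw with _ | v
      · by_cases hin : PySem.Str.isIn kw wl = true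
        all_goals simp only [PySem.Str.isIn] at hin
        · have hd1 : (if !d.contains kw && PySem.Str.isIn kw wl then d.insert kw i else d)
              = d.insert kw i := by
            simp [PySem.Dict.contains_eq_isSome_get?, PySem.Str.isIn, h, hin]
          rw [hd1]
          simp [PySem.Dict.get?_insert_self, hin]
        · have hd1 : (if !d.contains kw && PySem.Str.isIn kw wl then d.insert kw i else d)
              = d := by simp [PySem.Str.isIn, hin]
          rw [hd1]
          simp [h, hin]
      · have hd1 : (if !d.contains kw && PySem.Str.isIn kw wl then d.insert kw i else d)
            = d := by simp [PySem.Dict.contains_eq_isSome_get?, h]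
        rw [hd1]
        simp [h]
    · have hne : kw ≠ k := hk
      have hd' : (if !d.contains k && PySem.Str.isIn k wl then d.insert k i else d).get? kw
          = d.get? kw := by
        split_ifs with hc
        · exact PySem.Dict.get?_insert_of_ne d i hne
        · rfl
      rw [hd']
      simp [hk]

theorem pvBIndex_get? (words : List String) (kw : String) (hkw : kw ∈ pvKeywords) :
    (pvBIndex words).get? kw = pvFirstIdx kw 0 words := by
  have main : ∀ (ws : List String) (i₀ : Int) (d : PySem.Dict String Int),
      ((PySem.List.enumerate ws i₀).foldl (fun d p =>
          let wl := PySem.Str.lower p.2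
          pvKeywords.foldl (fun d kw =>
            if !d.contains kw && PySem.Str.isIn kw wl then d.insert kw p.1 else d) d) d).get? kw
        = if (d.get? kw).isSome then d.get? kw else pvFirstIdx kw i₀ ws := by
    intro ws
    induction ws with
    | nil =>
      intro i₀ d
      rcases h : d.get? kw with _ | v <;> simp [PySem.List.enumerate, pvFirstIdx, h]
    | cons w ws ih =>
      intro i₀ d
      simp only [PySem.List.enumerate, List.foldl_cons, ih]
      rw [pvInnerFold_get? pvKeywords (PySem.Str.lower w) i₀ d kw]
      rcases h : d.get? kw with _ | v
      · by_cases hin : PySem.Str.isIn kw (PySem.Str.lower w) = true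
        · simp_all [pvFirstIdx, PySem.Str.isIn, PySem.Str.lower]
        · simp_all [pvFirstIdx, PySem.Str.isIn, PySem.Str.lower]
      · simp
  rw [pvBIndex, main words 0 PySem.Dict.empty]
  simp [PySem.Dict.get?_empty]

-- every word produced by split() is an infix of the string
theorem pvSplit₀_go_infix (s : List Char) :
    ∀ (rest cur : List Char) (acc : List (List Char)),
      (∀ a ∈ acc, a <:+: s) → (cur.reverse ++ rest) <:+: s →
      ∀ w ∈ PySem.Chars.split₀.go rest cur acc, w <:+: s := by
  intro rest
  induction rest with
  | nil =>
    intro cur acc hacc hcur w hw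
    simp only [PySem.Chars.split₀.go] at hw
    split_ifs at hw with h
    · exact hacc w (by simpa using hw)
    · rcases (by simpa using hw) with hw | hw
      · exact hacc w hw
      · subst hw; simpa using hcur
  | cons c rest ih =>
    intro cur acc hacc hcur w hw
    have hcurInf : cur.reverse <:+: s :=
      List.IsInfix.trans (List.infix_append [] cur.reverse (c :: rest)) hcur
    have hrest : rest <:+: s := by
      refine List.IsInfix.trans ?_ hcur
      refine List.IsInfix.trans (l₂ := c :: rest) ?_ (List.suffix_append _ _).isInfix
      exact (List.suffix_cons c rest).isInfix
    simp only [PySem.Chars.split₀.go] at hw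
    split_ifs at hw with h1 h2
    · exact ih [] acc hacc (by simpa using hrest) w hw
    · refine ih [] (cur.reverse :: acc) ?_ (by simpa using hrest) w hw
      intro a ha
      rcases List.mem_cons.mp ha with rfl | ha
      · exact hcurInf
      · exact hacc a ha
    · refine ih (c :: cur) acc hacc ?_ w hw
      simpa using hcur

theorem pvMem_split₀_infix (description w : String)
    (hw : w ∈ PySem.Str.split₀ description) : w.toList <:+: description.toList := by
  simp only [PySem.Str.split₀, List.mem_map] at hw
  obtain ⟨cs, hcs, rfl⟩ := hw
  rw [String.toList_ofList]
  exact pvSplit₀_go_infix description.toList description.toList [] []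
    (by simp) (by simp) cs (by simpa [PySem.Chars.split₀] using hcs)

-- if some word contains kw, the whole lowered description contains kw
theorem pvFirstIdx_some_isIn (kw description : String) :
    ∀ (ws : List String) (i j : Int), (∀ w ∈ ws, w ∈ PySem.Str.split₀ description) →
      pvFirstIdx kw i ws = some j →
      PySem.Str.isIn kw (PySem.Str.lower description) = true := by
  intro ws
  induction ws with
  | nil => intro i j _ h; simp [pvFirstIdx] at h
  | cons w rest ih =>
    intro i j hmem h
    simp only [pvFirstIdx] at h
    split_ifs at h with hin
    · have hwinf : w.toList <:+: description.toList :=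
        pvMem_split₀_infix description w (hmem w (by simp))
      have h1 : kw.toList <:+: (PySem.Str.lower w).toList :=
        (PySem.Str.isIn_iff_infix kw (PySem.Str.lower w)).mp hin
      rw [PySem.Str.isIn_iff_infix]
      refine List.IsInfix.trans h1 ?_
      rw [PySem.Str.toList_lower, PySem.Str.toList_lower]
      exact List.IsInfix.map PySem.Chars.lowerChar hwinf
    · exact ih (i + 1) j (fun w hw => hmem w (by simp [hw])) h

theorem pvTailCongr (description : String) {f g : List String} (h : f = g) :
    (if f.isEmpty then PySem.Str.slice description none (some 100)
     else PySem.Str.join ", " (PySem.List.slice f none (some 3)))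
      = (if g.isEmpty then PySem.Str.slice description none (some 100)
         else PySem.Str.join ", " (PySem.List.slice g none (some 3))) := by
  rw [h]

theorem extract_key_features_py_spec : Claim_equal_extract_key_features_py := by
  intro description _
  unfold Spec_extract_key_features_py extract_key_features_py extract_key_features_py_alt
  apply pvTailCongr
  apply PySem.List.foldl_congr_mem
  intro acc kw hkw
  simp only [pvBIndex_get? (PySem.Str.split₀ description) kw hkw, pvAScan_eq]
  rcases h : pvFirstIdx kw 0 (PySem.Str.split₀ description) with _ | j
  · simp only [Option.map_none]
    split_ifs <;> rfl
  · have hin := pvFirstIdx_some_isIn kw description (PySem.Str.split₀ description) 0 j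
      (fun w hw => hw) h
    simp only [PySem.Str.isIn, PySem.Str.lower, String.toList_ofList] at hin
    simp [hin, pvPhrase, PySem.List.len_eq]
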